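-- pv_equiv track=rewrite | github.com/JackDevilGod/advent-of-code-2024 | 02/main2.py | save_checker
-- ===== SOURCE A (Python) =====
-- def save_checker(inp: list[int]) -> bool:
--     if len(set(inp)) != len(inp):
--         return False
--
--     if inp not in [sorted(inp), sorted(inp, reverse=True)]:
--         return False
--
--     for index in range(0, len(inp) - 1):
--         if abs(inp[index] - inp[index + 1]) not in [1, 2 ,3]:
--             return False
--
--     return True
-- ===== SOURCE B (Python) =====
-- def save_checker(inp: list[int]) -> bool:
--     # one short-circuiting linear pass over adjacent differences: a safe report is
--     # either strictly increasing with steps 1..3 or strictly decreasing with steps 1..3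
--     return all(1 <= inp[i + 1] - inp[i] <= 3 for i in range(len(inp) - 1)) or \
--            all(-3 <= inp[i + 1] - inp[i] <= -1 for i in range(len(inp) - 1))
-- ===== Notes on version B (the rewrite author's own statement) =====
-- stated objective: faster
-- what changed: Replaces the set-cardinality duplicate test, the two full sorts with list membership, and the abs-difference index loop by one short-circuiting linear pass over adjacent differences: safe iff every step is an increase of 1 to 3, or every step is a decrease of 1 to 3.
import Mathlib
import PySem

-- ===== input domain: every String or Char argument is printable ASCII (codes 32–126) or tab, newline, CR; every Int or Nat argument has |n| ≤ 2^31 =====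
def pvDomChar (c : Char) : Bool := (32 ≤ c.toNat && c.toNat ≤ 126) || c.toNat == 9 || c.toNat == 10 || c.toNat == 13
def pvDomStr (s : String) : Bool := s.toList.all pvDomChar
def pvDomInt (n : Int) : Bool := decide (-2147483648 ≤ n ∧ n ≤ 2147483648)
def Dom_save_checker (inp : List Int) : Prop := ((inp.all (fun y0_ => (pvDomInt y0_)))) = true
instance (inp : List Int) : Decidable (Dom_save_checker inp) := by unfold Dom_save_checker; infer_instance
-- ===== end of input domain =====

-- B replaces A's set-based duplicate test, two full sorts and an index loop by one linear
-- pass over adjacent differences (all in [1,3] or all in [-3,-1]); same Bool on every input.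

-- ===== PORT A =====
def save_checker (inp : List Int) : Bool :=
  if (PySem.Set.ofList inp).length ≠ inp.length then false
  else if ¬ ([PySem.List.sorted inp (fun x => x) false,
              PySem.List.sorted inp (fun x => x) true].contains inp) then false
  else
    (PySem.List.pyRange 0 ((inp.length : Int) - 1) 1).all (fun index =>
      ([1, 2, 3] : List Int).contains
        |PySem.List.pyGetD inp index 0 - PySem.List.pyGetD inp (index + 1) 0|)

-- ===== PORT B =====
def save_checker_alt (inp : List Int) : Bool :=
  ((PySem.List.pyRange 0 ((inp.length : Int) - 1) 1).all (fun i =>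
      decide (1 ≤ PySem.List.pyGetD inp (i + 1) 0 - PySem.List.pyGetD inp i 0) &&
      decide (PySem.List.pyGetD inp (i + 1) 0 - PySem.List.pyGetD inp i 0 ≤ 3))) ||
  ((PySem.List.pyRange 0 ((inp.length : Int) - 1) 1).all (fun i =>
      decide (-3 ≤ PySem.List.pyGetD inp (i + 1) 0 - PySem.List.pyGetD inp i 0) &&
      decide (PySem.List.pyGetD inp (i + 1) 0 - PySem.List.pyGetD inp i 0 ≤ -1)))

-- ===== PRECONDITION & SPEC =====
def Spec_save_checker (inp : List Int) (out : Bool) : Prop := out = save_checker_alt inp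
instance (inp : List Int) (out : Bool) : Decidable (Spec_save_checker inp out) := by unfold Spec_save_checker; infer_instance

-- ===== CLAIM (what is proved, stated in full; the proofs are below) =====
def Claim_equal_save_checker : Prop := ∀ (inp : List Int), Dom_save_checker inp → Spec_save_checker inp (save_checker inp)

-- ===== LEMMAS AND PROOFS =====

-- the adjacent difference inp[i+1] - inp[i] (total form via getD)
def pvAdj (inp : List Int) (i : Nat) : Int := inp.getD (i + 1) 0 - inp.getD i 0

-- an index loop over range(len(inp)-1) testing adjacent pairs, as a ∀ over Nat indices
lemma pvRangeAll (inp : List Int) (q : Int → Int → Bool) :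
    ((PySem.List.pyRange 0 ((inp.length : Int) - 1) 1).all (fun i =>
        q (PySem.List.pyGetD inp i 0) (PySem.List.pyGetD inp (i + 1) 0))) = true ↔
      ∀ i : Nat, i + 1 < inp.length → q (inp.getD i 0) (inp.getD (i + 1) 0) = true := by
  rw [List.all_eq_true]
  constructor
  · intro h i hi
    have hx : (i : Int) ∈ PySem.List.pyRange 0 ((inp.length : Int) - 1) 1 :=
      PySem.List.mem_pyRange_one.mpr ⟨by omega, by omega⟩
    have := h _ hx
    rw [PySem.List.pyGetD_eq_getElem inp 0 (by omega) (by omega : (i : Int) < inp.length),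
        show (i : Int) + 1 = ((i + 1 : Nat) : Int) by push_cast; ring,
        PySem.List.pyGetD_eq_getElem inp 0 (by omega)
          (by omega : ((i + 1 : Nat) : Int) < inp.length)] at this
    simp only [Int.toNat_natCast] at this
    rwa [List.getD_eq_getElem _ _ (by omega : i < inp.length), List.getD_eq_getElem _ _ hi]
  · intro h x hx
    obtain ⟨hx0, hx1⟩ := PySem.List.mem_pyRange_one.mp hx
    have hi : x.toNat + 1 < inp.length := by omega
    have := h x.toNat hi
    rw [List.getD_eq_getElem _ _ (by omega : x.toNat < inp.length),
        List.getD_eq_getElem _ _ hi] at this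
    rw [PySem.List.pyGetD_eq_getElem inp 0 hx0 (by omega),
        show x + 1 = ((x.toNat + 1 : Nat) : Int) by omega,
        PySem.List.pyGetD_eq_getElem inp 0 (by omega)
          (by omega : ((x.toNat + 1 : Nat) : Int) < inp.length)]
    simpa only [Int.toNat_natCast] using this

-- B = true iff all adjacent diffs lie in [1,3], or all lie in [-3,-1]
lemma alt_iff (inp : List Int) :
    save_checker_alt inp = true ↔
      ((∀ i : Nat, i + 1 < inp.length → 1 ≤ pvAdj inp i ∧ pvAdj inp i ≤ 3) ∨
       (∀ i : Nat, i + 1 < inp.length → -3 ≤ pvAdj inp i ∧ pvAdj inp i ≤ -1)) := by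
  unfold save_checker_alt
  rw [Bool.or_eq_true,
      pvRangeAll inp (fun a b => decide (1 ≤ b - a) && decide (b - a ≤ 3)),
      pvRangeAll inp (fun a b => decide (-3 ≤ b - a) && decide (b - a ≤ -1))]
  simp only [pvAdj, Bool.and_eq_true, decide_eq_true_eq]

-- membership in the literal lists A tests against, as propositions
lemma pvMem123 (y : Int) : (([1, 2, 3] : List Int).contains y = true) ↔ (y = 1 ∨ y = 2 ∨ y = 3) := by
  simp

lemma pvContainsPair (s1 s2 inp : List Int) :
    (([s1, s2] : List (List Int)).contains inp = true) ↔ (inp = s1 ∨ inp = s2) := by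
  simp

-- A's index loop = true iff every adjacent diff has absolute value 1, 2 or 3
lemma loop_iff (inp : List Int) :
    ((PySem.List.pyRange 0 ((inp.length : Int) - 1) 1).all (fun index =>
      ([1, 2, 3] : List Int).contains
        |PySem.List.pyGetD inp index 0 - PySem.List.pyGetD inp (index + 1) 0|)) = true ↔
    (∀ i : Nat, i + 1 < inp.length →
      |pvAdj inp i| = 1 ∨ |pvAdj inp i| = 2 ∨ |pvAdj inp i| = 3) := by
  rw [pvRangeAll inp (fun a b => ([1, 2, 3] : List Int).contains |a - b|)]
  constructor
  · intro h i hi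
    have := (pvMem123 _).mp (h i hi)
    rw [show |inp.getD i 0 - inp.getD (i + 1) 0| = |pvAdj inp i| from (by unfold pvAdj; exact abs_sub_comm _ _)] at this
    exact this
  · intro h i hi
    rw [pvMem123,
        show |inp.getD i 0 - inp.getD (i + 1) 0| = |pvAdj inp i| from (by unfold pvAdj; exact abs_sub_comm _ _)]
    exact h i hi

-- adjacent-pair condition (in total getD form) ↔ IsChain
lemma chain_getD_iff (R : Int → Int → Prop) (inp : List Int) :
    List.IsChain R inp ↔
      ∀ i : Nat, i + 1 < inp.length → R (inp.getD i 0) (inp.getD (i + 1) 0) := by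
  rw [List.isChain_iff_getElem]
  constructor
  · intro h i hi
    rw [List.getD_eq_getElem _ _ (by omega : i < inp.length), List.getD_eq_getElem _ _ hi]
    exact h i hi
  · intro h i hi
    have := h i hi
    rwa [List.getD_eq_getElem _ _ (by omega : i < inp.length), List.getD_eq_getElem _ _ hi] at this

lemma pairwise_lt_of_up (inp : List Int)
    (h : ∀ i : Nat, i + 1 < inp.length → 1 ≤ pvAdj inp i ∧ pvAdj inp i ≤ 3) :
    inp.Pairwise (· < ·) := by
  rw [← List.isChain_iff_pairwise, chain_getD_iff]
  intro i hi
  have := h i hi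
  unfold pvAdj at this
  omega

lemma pairwise_gt_of_down (inp : List Int)
    (h : ∀ i : Nat, i + 1 < inp.length → -3 ≤ pvAdj inp i ∧ pvAdj inp i ≤ -1) :
    inp.Pairwise (fun a b => b < a) := by
  rw [← List.isChain_iff_pairwise, chain_getD_iff]
  intro i hi
  have := h i hi
  unfold pvAdj at this
  omega

-- (PySem.Set.ofList xs).length = xs.length ↔ xs.Nodup
lemma pvOfList_sublist {α : Type} [BEq α] [LawfulBEq α] (xs : List α) :
    (PySem.Set.ofList xs).Sublist xs := by
  induction xs with
  | nil => simp [PySem.Set.ofList]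
  | cons x t ih =>
    rw [PySem.Set.ofList_cons]
    refine List.Sublist.cons₂ x (List.Sublist.trans ?_ ih)
    simp [PySem.Set.discard]

lemma pvLen_ofList_iff (xs : List Int) :
    (PySem.Set.ofList xs).length = xs.length ↔ xs.Nodup := by
  constructor
  · intro h
    have := (pvOfList_sublist xs).eq_of_length h
    rw [← this]
    exact PySem.Set.nodup_ofList xs
  · intro h
    rw [PySem.Set.ofList_eq_self_of_nodup xs h]

-- inp == sorted(inp) ↔ Pairwise (≤), and the reversed twin
lemma sorted_asc_iff (inp : List Int) :
    inp = PySem.List.sorted inp (fun x => x) false ↔ inp.Pairwise (· ≤ ·) := by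
  constructor
  · intro h
    have := PySem.List.sorted_pairwise inp (fun x => x)
    rw [← h] at this
    exact this
  · intro h
    exact (PySem.List.sorted_eq_self_of_pairwise inp (fun x => x) h).symm

lemma sorted_desc_iff (inp : List Int) :
    inp = PySem.List.sorted inp (fun x => x) true ↔ inp.Pairwise (fun a b => b ≤ a) := by
  constructor
  · intro h
    have := PySem.List.sorted_pairwise_rev inp (fun x => x)
    rw [← h] at this
    exact this
  · intro h
    exact (PySem.List.sorted_rev_eq_self_of_pairwise inp (fun x => x) h).symm

lemma nodup_of_updown (inp : List Int)
    (h : (∀ i : Nat, i + 1 < inp.length → 1 ≤ pvAdj inp i ∧ pvAdj inp i ≤ 3) ∨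
         (∀ i : Nat, i + 1 < inp.length → -3 ≤ pvAdj inp i ∧ pvAdj inp i ≤ -1)) :
    inp.Nodup := by
  rcases h with h | h
  · exact (pairwise_lt_of_up inp h).imp (fun hl => ne_of_lt hl)
  · exact (pairwise_gt_of_down inp h).imp (fun hl => (ne_of_lt hl).symm)

-- ===== VERDICT (by name: the statement is the Claim_ definition above) =====
theorem save_checker_spec : Claim_equal_save_checker := by
  intro inp _
  show save_checker inp = save_checker_alt inp
  rw [Bool.eq_iff_iff, alt_iff]
  unfold save_checker
  split_ifs with h1 h2
  · refine iff_of_false (by simp) ?_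
    intro hBD
    exact h1 ((pvLen_ofList_iff inp).mpr (nodup_of_updown inp hBD))
  · rw [loop_iff]
    rw [pvContainsPair] at h2
    constructor
    · intro habs
      rcases h2 with hs | hs
      · left
        intro i hi
        have hp := (sorted_asc_iff inp).mp hs
        have hle := (chain_getD_iff (· ≤ ·) inp).mp
          ((List.isChain_iff_pairwise).mpr hp) i hi
        have := habs i hi
        rw [Int.abs_eq_natAbs] at this
        unfold pvAdj at *
        omega
      · right
        intro i hi
        have hp := (sorted_desc_iff inp).mp hs
        have hle := (chain_getD_iff (fun a b => b ≤ a) inp).mp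
          ((List.isChain_iff_pairwise).mpr hp) i hi
        have := habs i hi
        rw [Int.abs_eq_natAbs] at this
        unfold pvAdj at *
        omega
    · intro hBD i hi
      rw [Int.abs_eq_natAbs]
      rcases hBD with h | h
      · have := h i hi; unfold pvAdj at *; omega
      · have := h i hi; unfold pvAdj at *; omega
  · refine iff_of_false (by simp) ?_
    rw [pvContainsPair] at h2
    rw [not_or] at h2
    intro hBD
    rcases hBD with h | h
    · exact h2.1 ((sorted_asc_iff inp).mpr ((pairwise_lt_of_up inp h).imp le_of_lt))
    · exact h2.2 ((sorted_desc_iff inp).mpr ((pairwise_gt_of_down inp h).imp le_of_lt))
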